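-- pv_equiv track=rewrite | github.com/khub-ai/openclaw-knowledge-management | usecases/arc-agi-2/python/grid_tools.py | recolor_small_components
-- ===== SOURCE A (Python) =====
-- from typing import List, Tuple, Optional
--
-- Grid = List[List[int]]
--
-- def recolor_small_components(
--     grid: Grid,
--     background: int = 0,
--     max_size: int = 2,
--     new_color: int = 3,
--     **kwargs,
-- ) -> Grid:
--     """
--     Find all connected components of same-colored non-background cells
--     (4-connectivity). Any component with <= max_size cells is recolored to
--     new_color. Larger components are left unchanged.
--
--     Default parameters match task 12eac192: components of size 1-2 → color 3.
--     MEDIATOR should infer max_size and new_color from the demos.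
--     """
--     from collections import deque
--     rows = len(grid)
--     cols = len(grid[0]) if rows else 0
--     result = [row[:] for row in grid]
--     visited = [[False] * cols for _ in range(rows)]
--     for r in range(rows):
--         for c in range(cols):
--             v = grid[r][c]
--             if v == background or visited[r][c]:
--                 continue
--             comp: list[tuple[int, int]] = []
--             q: deque[tuple[int, int]] = deque([(r, c)])
--             visited[r][c] = True
--             while q:
--                 cr, cc = q.popleft()
--                 comp.append((cr, cc))
--                 for dr, dc in ((-1, 0), (1, 0), (0, -1), (0, 1)):
--                     nr, nc = cr + dr, cc + dc
--                     if (0 <= nr < rows and 0 <= nc < cols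
--                             and not visited[nr][nc]
--                             and grid[nr][nc] == v):
--                         visited[nr][nc] = True
--                         q.append((nr, nc))
--             if len(comp) <= max_size:
--                 for cr, cc in comp:
--                     result[cr][cc] = new_color
--     return result
-- ===== SOURCE B (Python) =====
-- def recolor_small_components(grid, background=0, max_size=2, new_color=3, **kwargs):
--     # Components via bounded set-saturation (iterated neighbourhood closure), no queue/visited arrays.
--     rows = len(grid)
--     cols = len(grid[0]) if rows else 0
--     sizes = {}
--     for r in range(rows):
--         for c in range(cols):
--             v = grid[r][c]
--             if v == background or (r, c) in sizes:
--                 continue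
--             cells = {(r, c)}
--             for _ in range(rows * cols):
--                 grown = {(nr, nc)
--                          for (cr, cc) in cells
--                          for (nr, nc) in ((cr - 1, cc), (cr + 1, cc), (cr, cc - 1), (cr, cc + 1))
--                          if 0 <= nr < rows and 0 <= nc < cols and grid[nr][nc] == v}
--                 if grown <= cells:
--                     break
--                 cells |= grown
--             n = len(cells)
--             for cell in cells:
--                 sizes[cell] = n
--     result = [row[:] for row in grid]
--     for r in range(rows):
--         for c in range(cols):
--             if grid[r][c] != background and sizes[(r, c)] <= max_size:
--                 result[r][c] = new_color
--     return result
-- ===== Notes on version B (the rewrite author's own statement) =====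
-- stated objective: alternative
-- what changed: Components are computed by iterated whole-set neighbourhood saturation (a fixed-point closure on Python sets, with a size cache per component) instead of a per-seed BFS with a deque and a 2D visited array; the final grid is then recolored in a separate pass from the size table.
import Mathlib
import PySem

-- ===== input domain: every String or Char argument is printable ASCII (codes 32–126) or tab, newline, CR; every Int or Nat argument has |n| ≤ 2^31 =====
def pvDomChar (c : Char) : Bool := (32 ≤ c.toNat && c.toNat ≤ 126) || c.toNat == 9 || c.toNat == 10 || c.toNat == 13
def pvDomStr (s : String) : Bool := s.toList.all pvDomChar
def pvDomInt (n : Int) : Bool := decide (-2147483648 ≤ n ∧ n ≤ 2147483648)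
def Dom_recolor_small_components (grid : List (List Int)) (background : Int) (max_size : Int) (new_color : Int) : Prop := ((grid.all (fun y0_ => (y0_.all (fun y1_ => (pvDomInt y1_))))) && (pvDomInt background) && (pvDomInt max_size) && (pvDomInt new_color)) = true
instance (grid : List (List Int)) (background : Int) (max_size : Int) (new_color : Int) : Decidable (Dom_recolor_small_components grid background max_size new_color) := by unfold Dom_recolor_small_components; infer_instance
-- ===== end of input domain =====

-- B replaces A's per-seed BFS (deque + 2D visited array) by an iterated whole-set
-- neighbourhood saturation (fixed-point closure) with a per-component size table;
-- same return value on every input where A returns (A raises on ragged grids with a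
-- row shorter than the first row — excluded by Pre_).

-- ===== PORT A =====

-- visited[r][c] as an Option (none = index outside the array); Python only reads it
-- under the 0 ≤ nr < rows ∧ 0 ≤ nc < cols guard, where it is `some`.
def pvVis? (vis : List (List Bool)) (r c : Int) : Option Bool :=
  vis[r.toNat]?.bind (fun row => row[c.toNat]?)

-- xs[r][c] = a  (in-place 2D assignment; only used at guarded in-bounds indices)
def pvSet2 {α : Type} (g : List (List α)) (r c : Int) (a : α) : List (List α) :=
  g.set r.toNat ((g.getD r.toNat []).set c.toNat a)

-- grid[r][c] (both indices nonnegative and in range at every use site)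
def pvCell (g : List (List Int)) (r c : Int) : Int :=
  PySem.List.pyGetD (PySem.List.pyGetD g r []) c 0

def pvDirs : List (Int × Int) := [(-1, 0), (1, 0), (0, -1), (0, 1)]

-- number of False entries of visited (termination measure only)
def pvCountF (vis : List (List Bool)) : Nat := (vis.map (fun row => row.count false)).sum

-- one neighbour check of A's BFS inner `for dr, dc in …` loop
def pvScan (g : List (List Int)) (rows cols v cr cc : Int)
    (st : List (Int × Int) × List (List Bool)) (d : Int × Int) :
    List (Int × Int) × List (List Bool) :=
  let nr := cr + d.1
  let nc := cc + d.2
  if 0 ≤ nr ∧ nr < rows ∧ 0 ≤ nc ∧ nc < cols ∧ pvVis? st.2 nr nc = some false ∧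
      pvCell g nr nc = v then
    (st.1 ++ [(nr, nc)], pvSet2 st.2 nr nc true)
  else st

theorem pvCount_set_false (row : List Bool) (j : Nat) (h : row[j]? = some false) :
    (row.set j true).count false + 1 = row.count false := by
  induction row generalizing j with
  | nil => simp at h
  | cons a t ih =>
      cases j with
      | zero =>
          simp only [List.getElem?_cons_zero, Option.some.injEq] at h
          subst h
          simp [List.count_cons]
      | succ j =>
          simp only [List.getElem?_cons_succ] at h
          simp only [List.set_cons_succ, List.count_cons]
          have := ih j h
          omega

theorem pvVis?_elim (vis : List (List Bool)) (r c : Int) (b : Bool)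
    (h : pvVis? vis r c = some b) :
    ∃ row, vis[r.toNat]? = some row ∧ row[c.toNat]? = some b := by
  unfold pvVis? at h
  cases hr : vis[r.toNat]? with
  | none => simp [hr] at h
  | some row => exact ⟨row, rfl, by simpa [hr] using h⟩

theorem pvSum_map_set (vis : List (List Bool)) (i : Nat) (row' : List Bool)
    (h : i < vis.length) :
    ((vis.set i row').map (fun r => r.count false)).sum + (vis[i]).count false =
      (vis.map (fun r => r.count false)).sum + row'.count false := by
  induction vis generalizing i with
  | nil => simp at h
  | cons a t ih =>
      cases i with
      | zero => simp [List.set_cons_zero]; omega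
      | succ i =>
          simp only [List.set_cons_succ, List.map_cons, List.sum_cons, List.getElem_cons_succ]
          have := ih i (by simpa using h)
          omega

theorem pvCountF_set2 (vis : List (List Bool)) (r c : Int)
    (h : pvVis? vis r c = some false) :
    pvCountF (pvSet2 vis r c true) + 1 = pvCountF vis := by
  obtain ⟨row, hr, hb⟩ := pvVis?_elim vis r c false h
  obtain ⟨hlen, hev⟩ := List.getElem?_eq_some_iff.mp hr
  unfold pvSet2 pvCountF
  rw [List.getD_eq_getElem _ _ hlen, hev]
  have e1 := pvSum_map_set vis r.toNat (row.set c.toNat true) hlen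
  have e2 := pvCount_set_false row c.toNat hb
  rw [hev] at e1
  omega

theorem pvScan_measure (g : List (List Int)) (rows cols v cr cc : Int)
    (st : List (Int × Int) × List (List Bool)) (d : Int × Int) :
    2 * pvCountF (pvScan g rows cols v cr cc st d).2 +
      (pvScan g rows cols v cr cc st d).1.length ≤ 2 * pvCountF st.2 + st.1.length := by
  unfold pvScan
  simp only []
  split
  · rename_i h
    have := pvCountF_set2 st.2 (cr + d.1) (cc + d.2) h.2.2.2.2.1
    simp; omega
  · simp

theorem pvScanFold_measure (g : List (List Int)) (rows cols v cr cc : Int)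
    (ds : List (Int × Int)) (st : List (Int × Int) × List (List Bool)) :
    2 * pvCountF (ds.foldl (pvScan g rows cols v cr cc) st).2 +
      (ds.foldl (pvScan g rows cols v cr cc) st).1.length ≤
      2 * pvCountF st.2 + st.1.length := by
  induction ds generalizing st with
  | nil => simp
  | cons d ds ih =>
      simp only [List.foldl_cons]
      exact le_trans (ih _) (pvScan_measure g rows cols v cr cc st d)

-- A's BFS `while q:` loop (queue, visited, comp)
def pvBfs (g : List (List Int)) (rows cols v : Int) :
    List (Int × Int) → List (List Bool) → List (Int × Int) →
    List (Int × Int) × List (List Bool)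
  | [], vis, comp => (comp, vis)
  | (cr, cc) :: q, vis, comp =>
    let st := pvDirs.foldl (pvScan g rows cols v cr cc) (q, vis)
    pvBfs g rows cols v st.1 st.2 (comp ++ [(cr, cc)])
termination_by q vis _ => 2 * pvCountF vis + q.length
decreasing_by
  have h := pvScanFold_measure g rows cols v cr cc pvDirs (q, vis)
  simp only [List.length_cons]
  dsimp only at h ⊢
  omega

def recolor_small_components (grid : List (List Int)) (background : Int)
    (max_size : Int) (new_color : Int) : List (List Int) :=
  let rows : Int := grid.length
  let cols : Int := if grid.length ≠ 0 then ((grid.headD []).length : Int) else 0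
  let st := (PySem.List.pyRange 0 rows 1).foldl (fun st r =>
      (PySem.List.pyRange 0 cols 1).foldl
        (fun (st : List (List Int) × List (List Bool)) c =>
          let v := pvCell grid r c
          if v = background ∨ pvVis? st.2 r c = some true then st
          else
            let bf := pvBfs grid rows cols v [(r, c)] (pvSet2 st.2 r c true) []
            if (bf.1.length : Int) ≤ max_size then
              (bf.1.foldl (fun res p => pvSet2 res p.1 p.2 new_color) st.1, bf.2)
            else (st.1, bf.2)) st)
    (grid.map (fun row => row), List.replicate grid.length (List.replicate cols.toNat false))
  st.1

-- ===== PORT B =====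

-- the set comprehension `grown = {...}` of B
def pvGrow (g : List (List Int)) (rows cols v : Int) (cells : List (Int × Int)) :
    List (Int × Int) :=
  PySem.Set.ofList (cells.flatMap (fun p =>
    [(p.1 - 1, p.2), (p.1 + 1, p.2), (p.1, p.2 - 1), (p.1, p.2 + 1)].filter
      (fun q => decide (0 ≤ q.1 ∧ q.1 < rows ∧ 0 ≤ q.2 ∧ q.2 < cols ∧
        pvCell g q.1 q.2 = v))))

-- B's bounded saturation loop `for _ in range(rows*cols): … break …`
def pvSat (g : List (List Int)) (rows cols v : Int) :
    Nat → List (Int × Int) → List (Int × Int)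
  | 0, cells => cells
  | n + 1, cells =>
    let grown := pvGrow g rows cols v cells
    if PySem.Set.issubset grown cells then cells
    else pvSat g rows cols v n (PySem.Set.union cells grown)

def recolor_small_components_alt (grid : List (List Int)) (background : Int)
    (max_size : Int) (new_color : Int) : List (List Int) :=
  let rows : Int := grid.length
  let cols : Int := if grid.length ≠ 0 then ((grid.headD []).length : Int) else 0
  let sizes : PySem.Dict (Int × Int) Int :=
    (PySem.List.pyRange 0 rows 1).foldl (fun sz r =>
      (PySem.List.pyRange 0 cols 1).foldl
        (fun (sz : PySem.Dict (Int × Int) Int) c =>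
          let v := pvCell grid r c
          if v = background ∨ sz.contains (r, c) then sz
          else
            let cells := pvSat grid rows cols v (rows * cols).toNat
              (PySem.Set.ofList [(r, c)])
            let n : Int := cells.length
            cells.foldl (fun sz p => sz.insert p n) sz) sz)
      PySem.Dict.empty
  (PySem.List.pyRange 0 rows 1).foldl (fun res r =>
    (PySem.List.pyRange 0 cols 1).foldl (fun (res : List (List Int)) c =>
      if pvCell grid r c ≠ background ∧ PySem.Dict.getD sizes (r, c) 0 ≤ max_size then
        pvSet2 res r c new_color
      else res) res)
    (grid.map (fun row => row))

-- ===== PRECONDITION & SPEC =====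
-- Pre_ excludes exactly the grids on which Python A raises IndexError: those with some
-- row shorter than row 0 (reading grid[r][c] for c in range(len(grid[0]))).
def Pre_recolor_small_components (grid : List (List Int)) (background : Int)
    (max_size : Int) (new_color : Int) : Prop :=
  ∀ row ∈ grid, (grid.headD []).length ≤ row.length
instance (grid : List (List Int)) (background : Int) (max_size : Int) (new_color : Int) : Decidable (Pre_recolor_small_components grid background max_size new_color) := by unfold Pre_recolor_small_components; infer_instance

def pvWitness_recolor_small_components : List (List Int) × Int × Int × Int :=
  ([[1, 1, 0], [0, 2, 0], [2, 2, 2]], 0, 2, 3)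

def Spec_recolor_small_components (grid : List (List Int)) (background : Int) (max_size : Int) (new_color : Int) (out : List (List Int)) : Prop := out = recolor_small_components_alt grid background max_size new_color
instance (grid : List (List Int)) (background : Int) (max_size : Int) (new_color : Int) (out : List (List Int)) : Decidable (Spec_recolor_small_components grid background max_size new_color out) := by unfold Spec_recolor_small_components; infer_instance

-- ===== CLAIM (what is proved, stated in full; the proofs are below) =====
def Claim_equal_recolor_small_components : Prop := ∀ (grid : List (List Int)) (background : Int) (max_size : Int) (new_color : Int), Dom_recolor_small_components grid background max_size new_color → Pre_recolor_small_components grid background max_size new_color → Spec_recolor_small_components grid background max_size new_color (recolor_small_components grid background max_size new_color)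


-- ===== LEMMAS AND PROOFS =====

-- ---- basic 2D-array facts ----

def pvInb (rows cols : Int) (p : Int × Int) : Prop :=
  0 ≤ p.1 ∧ p.1 < rows ∧ 0 ≤ p.2 ∧ p.2 < cols

def pvShape (rows cols : Int) (vis : List (List Bool)) : Prop :=
  vis.length = rows.toNat ∧ ∀ row ∈ vis, row.length = cols.toNat

theorem pvShape_set2 (rows cols : Int) (vis : List (List Bool)) (r c : Int) (b : Bool)
    (hs : pvShape rows cols vis) : pvShape rows cols (pvSet2 vis r c b) := by
  obtain ⟨hl, hrow⟩ := hs
  by_cases hi : r.toNat < vis.length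
  · refine ⟨by simpa [pvSet2] using hl, ?_⟩
    intro row hmem
    rcases List.mem_or_eq_of_mem_set hmem with h | h
    · exact hrow _ h
    · subst h
      rw [List.getD_eq_getElem _ _ hi, List.length_set]
      exact hrow _ (List.getElem_mem hi)
  · unfold pvSet2
    rw [List.set_eq_of_length_le (by omega)]
    exact ⟨hl, hrow⟩

theorem pvVis?_isSome (rows cols : Int) (vis : List (List Bool)) (p : Int × Int)
    (hs : pvShape rows cols vis) (hp : pvInb rows cols p) :
    ∃ b, pvVis? vis p.1 p.2 = some b := by
  obtain ⟨hl, hrow⟩ := hs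
  obtain ⟨h1, h2, h3, h4⟩ := hp
  have hr : p.1.toNat < vis.length := by omega
  have hcl : (vis[p.1.toNat]).length = cols.toNat := hrow _ (List.getElem_mem hr)
  have hc : p.2.toNat < (vis[p.1.toNat]).length := by omega
  exact ⟨vis[p.1.toNat][p.2.toNat],
    by simp [pvVis?, List.getElem?_eq_getElem hr, List.getElem?_eq_getElem hc]⟩

theorem pvVis?_set2_self (rows cols : Int) (vis : List (List Bool)) (p : Int × Int) (b : Bool)
    (hs : pvShape rows cols vis) (hp : pvInb rows cols p) :
    pvVis? (pvSet2 vis p.1 p.2 b) p.1 p.2 = some b := by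
  obtain ⟨hl, hrow⟩ := hs
  obtain ⟨h1, h2, h3, h4⟩ := hp
  have hr : p.1.toNat < vis.length := by omega
  have hcl : (vis[p.1.toNat]).length = cols.toNat := hrow _ (List.getElem_mem hr)
  have hc : p.2.toNat < (vis[p.1.toNat]).length := by omega
  unfold pvVis? pvSet2
  rw [List.getD_eq_getElem _ _ hr, List.getElem?_set_self', List.getElem?_eq_getElem hr]
  simp [List.getElem?_set_self', List.getElem?_eq_getElem hc, Function.const]

theorem pvVis?_set2_ne (rows cols : Int) (vis : List (List Bool)) (p q : Int × Int) (b : Bool)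
    (hp : pvInb rows cols p) (hq : pvInb rows cols q) (hne : p ≠ q) :
    pvVis? (pvSet2 vis p.1 p.2 b) q.1 q.2 = pvVis? vis q.1 q.2 := by
  obtain ⟨hp1, hp2, hp3, hp4⟩ := hp
  obtain ⟨hq1, hq2, hq3, hq4⟩ := hq
  unfold pvVis? pvSet2
  by_cases hr : p.1.toNat = q.1.toNat
  · have hcne : p.2.toNat ≠ q.2.toNat := by
      intro hc
      apply hne
      obtain ⟨a, b'⟩ := p; obtain ⟨c', d⟩ := q
      simp only [Prod.mk.injEq]
      simp only at hp1 hp2 hp3 hp4 hq1 hq2 hq3 hq4 hr hc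
      omega
    by_cases hlen : p.1.toNat < vis.length
    · have e1 : (vis.set p.1.toNat ((vis.getD p.1.toNat []).set p.2.toNat b))[q.1.toNat]? =
          some ((vis.getD p.1.toNat []).set p.2.toNat b) := by
        rw [← hr, List.getElem?_set_self', List.getElem?_eq_getElem hlen]
        simp [Function.const]
      rw [e1]
      simp only [Option.bind_some]
      rw [List.getElem?_set_ne hcne, List.getD_eq_getElem?_getD, hr]
      cases hv : vis[q.1.toNat]? with
      | none => simp [hv]
      | some row => simp [hv]
    · rw [List.set_eq_of_length_le (by omega)]
  · rw [List.getElem?_set_ne hr]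

def pvE? {α : Type} (res : List (List α)) (r c : Nat) : Option α :=
  res[r]?.bind (fun row => row[c]?)

theorem pvE?_set2 {α : Type} (res : List (List α)) (r c : Int) (a : α) (r' c' : Nat) :
    pvE? (pvSet2 res r c a) r' c' =
      if r' = r.toNat ∧ c' = c.toNat then (pvE? res r' c').map (fun _ => a)
      else pvE? res r' c' := by
  unfold pvE? pvSet2
  by_cases h1 : r' = r.toNat
  · subst h1
    by_cases hlen : r.toNat < res.length
    · have e1 : (res.set r.toNat ((res.getD r.toNat []).set c.toNat a))[r.toNat]? =
          some ((res.getD r.toNat []).set c.toNat a) := by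
        rw [List.getElem?_set_self', List.getElem?_eq_getElem hlen]
        simp [Function.const]
      rw [e1]
      simp only [Option.bind_some]
      rw [List.getD_eq_getElem _ _ hlen, List.getElem?_eq_getElem hlen]
      simp only [Option.bind_some, eq_self_iff_true, true_and]
      by_cases h2 : c' = c.toNat
      · subst h2
        rw [if_pos rfl, List.getElem?_set_self']
        cases hv : (res[r.toNat])[c.toNat]? <;> simp [Function.const, hv]
      · rw [if_neg h2, List.getElem?_set_ne (fun h => h2 h.symm)]
    · rw [List.set_eq_of_length_le (by omega)]
      have hnone : res[r.toNat]? = none := List.getElem?_eq_none (by omega)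
      simp [hnone]
  · rw [List.getElem?_set_ne (fun h => h1 h.symm)]
    simp [h1]

theorem pvE?_foldl_set2 {α : Type} (comp : List (Int × Int)) (res : List (List α)) (a : α)
    (hinb : ∀ p ∈ comp, 0 ≤ p.1 ∧ 0 ≤ p.2) (r' c' : Nat) :
    pvE? (comp.foldl (fun res p => pvSet2 res p.1 p.2 a) res) r' c' =
      if ((r' : Int), (c' : Int)) ∈ comp then (pvE? res r' c').map (fun _ => a)
      else pvE? res r' c' := by
  induction comp generalizing res with
  | nil => simp
  | cons p t ih =>
      have hp := hinb p List.mem_cons_self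
      simp only [List.foldl_cons]
      rw [ih _ (fun q hq => hinb q (List.mem_cons_of_mem _ hq)), pvE?_set2]
      by_cases h1 : ((r' : Int), (c' : Int)) ∈ t
      · rw [if_pos h1, if_pos (List.mem_cons_of_mem _ h1)]
        by_cases h2 : r' = p.1.toNat ∧ c' = p.2.toNat
        · rw [if_pos h2]
          cases pvE? res r' c' <;> simp
        · rw [if_neg h2]
      · rw [if_neg h1]
        by_cases h2 : r' = p.1.toNat ∧ c' = p.2.toNat
        · rw [if_pos h2]
          have hpe : ((r' : Int), (c' : Int)) = p := by
            obtain ⟨a1, a2⟩ := p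
            obtain ⟨e1, e2⟩ := h2
            simp only at hp
            simp only [Prod.mk.injEq]
            omega
          rw [if_pos (by rw [hpe]; exact List.mem_cons_self)]
        · rw [if_neg h2]
          rw [if_neg ?_]
          intro hmem
          rcases List.mem_cons.mp hmem with he | he
          · apply h2
            obtain ⟨a1, a2⟩ := p
            simp only [Prod.mk.injEq] at he
            simp only at hp
            constructor <;> omega
          · exact h1 he

def pvSameShape {α β : Type} (res : List (List α)) (g : List (List β)) : Prop :=
  res.length = g.length ∧ ∀ i : Nat, res[i]?.map List.length = g[i]?.map List.length

theorem pvSameShape_refl {α : Type} (g : List (List α)) : pvSameShape g g := ⟨rfl, fun _ => rfl⟩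

theorem pvSameShape_set2 {α β : Type} (res : List (List α)) (g : List (List β)) (r c : Int) (a : α)
    (h : pvSameShape res g) : pvSameShape (pvSet2 res r c a) g := by
  obtain ⟨h1, h2⟩ := h
  refine ⟨by simpa [pvSet2] using h1, ?_⟩
  intro i
  by_cases hi : i = r.toNat
  · subst hi
    by_cases hlen : r.toNat < res.length
    · unfold pvSet2
      rw [List.getElem?_set_self', List.getElem?_eq_getElem hlen,
        List.getD_eq_getElem _ _ hlen]
      have h3 := h2 r.toNat
      rw [List.getElem?_eq_getElem hlen] at h3
      simpa [Function.const, List.length_set] using h3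
    · unfold pvSet2
      rw [List.set_eq_of_length_le (by omega)]
      exact h2 r.toNat
  · unfold pvSet2
    rw [List.getElem?_set_ne (fun h => hi h.symm)]
    exact h2 i

theorem pvSameShape_foldl_set2 {α β : Type} (comp : List (Int × Int)) (res : List (List α))
    (g : List (List β)) (a : α) (h : pvSameShape res g) :
    pvSameShape (comp.foldl (fun res p => pvSet2 res p.1 p.2 a) res) g := by
  induction comp generalizing res with
  | nil => exact h
  | cons p t ih => exact ih _ (pvSameShape_set2 _ _ _ _ _ h)

theorem pvEq_of_entries {α : Type} (X Y g : List (List α))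
    (hX : pvSameShape X g) (hY : pvSameShape Y g)
    (h : ∀ r c : Nat, pvE? X r c = pvE? Y r c) : X = Y := by
  apply List.ext_getElem?
  intro i
  by_cases hi : i < g.length
  · have hXi : i < X.length := by rw [hX.1]; exact hi
    have hYi : i < Y.length := by rw [hY.1]; exact hi
    rw [List.getElem?_eq_getElem hXi, List.getElem?_eq_getElem hYi]
    have hrow : X[i] = Y[i] := by
      apply List.ext_getElem?
      intro j
      have hx := h i j
      simp only [pvE?, List.getElem?_eq_getElem hXi, List.getElem?_eq_getElem hYi,
        Option.bind_some] at hx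
      exact hx
    rw [hrow]
  · rw [List.getElem?_eq_none (by rw [hX.1]; omega : X.length ≤ i),
      List.getElem?_eq_none (by rw [hY.1]; omega : Y.length ≤ i)]

-- ---- reachability ----

def pvNbr (x y : Int × Int) : Prop :=
  y = (x.1 - 1, x.2) ∨ y = (x.1 + 1, x.2) ∨ y = (x.1, x.2 - 1) ∨ y = (x.1, x.2 + 1)

def pvStepR (g : List (List Int)) (rows cols v : Int) (x y : Int × Int) : Prop :=
  pvNbr x y ∧ pvInb rows cols y ∧ pvCell g y.1 y.2 = v

def pvReach (g : List (List Int)) (rows cols v : Int) (x y : Int × Int) : Prop :=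
  Relation.ReflTransGen (pvStepR g rows cols v) x y

theorem pvStepR_symm (g : List (List Int)) (rows cols v : Int) (x y : Int × Int)
    (hx : pvInb rows cols x) (hvx : pvCell g x.1 x.2 = v) (h : pvStepR g rows cols v x y) :
    pvStepR g rows cols v y x := by
  obtain ⟨hn, _, _⟩ := h
  refine ⟨?_, hx, hvx⟩
  unfold pvNbr at hn ⊢
  obtain ⟨a, b⟩ := x
  obtain ⟨c, d⟩ := y
  simp [Prod.ext_iff] at hn ⊢
  omega

theorem pvReach_props (g : List (List Int)) (rows cols v : Int) (x y : Int × Int)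
    (hx : pvInb rows cols x) (hvx : pvCell g x.1 x.2 = v)
    (h : pvReach g rows cols v x y) : pvInb rows cols y ∧ pvCell g y.1 y.2 = v := by
  induction h with
  | refl => exact ⟨hx, hvx⟩
  | tail _ hstep _ => exact ⟨hstep.2.1, hstep.2.2⟩

theorem pvReach_symm (g : List (List Int)) (rows cols v : Int) (x y : Int × Int)
    (hx : pvInb rows cols x) (hvx : pvCell g x.1 x.2 = v)
    (h : pvReach g rows cols v x y) : pvReach g rows cols v y x := by
  induction h with
  | refl => exact Relation.ReflTransGen.refl
  | @tail b c hxb hstep ih =>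
      have hb := pvReach_props g rows cols v x b hx hvx hxb
      exact Relation.ReflTransGen.head (pvStepR_symm g rows cols v b c hb.1 hb.2 hstep) ih

theorem pvReach_congr (g : List (List Int)) (rows cols v : Int) (x y : Int × Int)
    (hx : pvInb rows cols x) (hvx : pvCell g x.1 x.2 = v)
    (hxy : pvReach g rows cols v x y) :
    ∀ z, pvReach g rows cols (pvCell g y.1 y.2) y z ↔ pvReach g rows cols v x z := by
  have hy := pvReach_props g rows cols v x y hx hvx hxy
  intro z
  rw [hy.2]
  constructor
  · exact fun h => Relation.ReflTransGen.trans hxy h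
  · exact fun h => Relation.ReflTransGen.trans (pvReach_symm g rows cols v x y hx hvx hxy) h

-- ---- counting ----

theorem pvLength_eq_of_nodup (l₁ l₂ : List (Int × Int)) (h₁ : l₁.Nodup) (h₂ : l₂.Nodup)
    (h : ∀ y, y ∈ l₁ ↔ y ∈ l₂) : l₁.length = l₂.length :=
  ((List.perm_ext_iff_of_nodup h₁ h₂).mpr h).length_eq

theorem pvLength_le_area (rows cols : Int) (l : List (Int × Int)) (hnd : l.Nodup)
    (hinb : ∀ p ∈ l, pvInb rows cols p) : l.length ≤ (rows * cols).toNat := by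
  rcases l with _ | ⟨p0, t⟩
  · simp
  · have hp0 := hinb p0 List.mem_cons_self
    have hrowpos : 0 < rows := lt_of_le_of_lt hp0.1 hp0.2.1
    have hcolpos : 0 < cols := lt_of_le_of_lt hp0.2.2.1 hp0.2.2.2
    set L := p0 :: t with hL
    set C := cols.toNat with hC
    have hCpos : 0 < C := by omega
    set f : Int × Int → Nat := fun q => q.2.toNat + q.1.toNat * C with hf
    have hfd : ∀ q, pvInb rows cols q → f q / C = q.1.toNat ∧ f q % C = q.2.toNat := by
      intro q hq
      obtain ⟨h1, h2, h3, h4⟩ := hq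
      constructor
      · simp only [hf]
        rw [Nat.add_mul_div_right _ _ hCpos, Nat.div_eq_of_lt (by omega)]
        omega
      · simp only [hf]
        rw [Nat.add_mul_mod_self_right]
        exact Nat.mod_eq_of_lt (by omega)
    have hinj : ∀ x ∈ L, ∀ y ∈ L, f x = f y → x = y := by
      intro x hx y hy hxy
      have hx' := hfd x (hinb x hx)
      have hy' := hfd y (hinb y hy)
      have hxq := hinb x hx
      have hyq := hinb y hy
      have e1 : x.1.toNat = y.1.toNat := by rw [← hx'.1, ← hy'.1, hxy]
      have e2 : x.2.toNat = y.2.toNat := by rw [← hx'.2, ← hy'.2, hxy]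
      obtain ⟨x1, x2⟩ := x
      obtain ⟨y1, y2⟩ := y
      obtain ⟨a1, a2, a3, a4⟩ := hxq
      obtain ⟨b1, b2, b3, b4⟩ := hyq
      simp only at e1 e2 a1 a2 a3 a4 b1 b2 b3 b4
      simp only [Prod.mk.injEq]
      omega
    have hmap : (L.map f).Nodup := hnd.map_on hinj
    have hsub : (L.map f).toFinset ⊆ Finset.range (rows.toNat * C) := by
      intro n hn
      rw [List.mem_toFinset, List.mem_map] at hn
      obtain ⟨q, hq, rfl⟩ := hn
      rw [Finset.mem_range]
      obtain ⟨h1, h2, h3, h4⟩ := hinb q hq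
      have hlt : f q < (q.1.toNat + 1) * C := by
        simp only [hf]
        rw [Nat.succ_mul]
        omega
      exact lt_of_lt_of_le hlt (Nat.mul_le_mul_right _ (by omega))
    have hcard := Finset.card_le_card hsub
    rw [List.toFinset_card_of_nodup hmap, List.length_map, Finset.card_range] at hcard
    have hcast : ((rows.toNat * C : Nat) : Int) = rows * cols := by
      push_cast
      rw [Int.toNat_of_nonneg (by omega), hC, Int.toNat_of_nonneg (by omega)]
    omega

-- ---- saturation (B's component computation) ----

theorem pvMem_grow (g : List (List Int)) (rows cols v : Int) (cells : List (Int × Int))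
    (y : Int × Int) :
    y ∈ pvGrow g rows cols v cells ↔ ∃ x ∈ cells, pvStepR g rows cols v x y := by
  unfold pvGrow pvStepR pvNbr pvInb
  rw [PySem.Set.mem_ofList]
  simp only [List.mem_flatMap, List.mem_filter, List.mem_cons, List.not_mem_nil, or_false,
    decide_eq_true_eq]
  constructor
  · rintro ⟨x, hx, h1, h2, h3, h4, h5, h6⟩
    exact ⟨x, hx, h1, ⟨h2, h3, h4, h5⟩, h6⟩
  · rintro ⟨x, hx, h1, ⟨h2, h3, h4, h5⟩, h6⟩
    exact ⟨x, hx, h1, h2, h3, h4, h5, h6⟩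

theorem pvSat_nodup (g : List (List Int)) (rows cols v : Int) (n : Nat)
    (cells : List (Int × Int)) (h : cells.Nodup) : (pvSat g rows cols v n cells).Nodup := by
  induction n generalizing cells with
  | zero => exact h
  | succ n ih =>
      rw [pvSat]
      split
      · exact h
      · exact ih _ (PySem.Set.nodup_union _ _ h)

theorem pvSat_subset (g : List (List Int)) (rows cols v : Int) (n : Nat)
    (cells : List (Int × Int)) (x : Int × Int) (hx : x ∈ cells) :
    x ∈ pvSat g rows cols v n cells := by
  induction n generalizing cells with
  | zero => exact hx
  | succ n ih =>
      rw [pvSat]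
      split
      · exact hx
      · exact ih _ (by rw [PySem.Set.mem_union]; exact Or.inl hx)

theorem pvSat_sound (g : List (List Int)) (rows cols v : Int) (P : Int × Int → Prop)
    (hP : ∀ x, P x → ∀ y, pvStepR g rows cols v x y → P y) (n : Nat)
    (cells : List (Int × Int)) (h : ∀ x ∈ cells, P x) :
    ∀ x ∈ pvSat g rows cols v n cells, P x := by
  induction n generalizing cells with
  | zero => exact h
  | succ n ih =>
      rw [pvSat]
      split
      · exact h
      · refine ih _ ?_
        intro x hx
        rw [PySem.Set.mem_union] at hx
        rcases hx with hx | hx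
        · exact h x hx
        · obtain ⟨z, hz, hstep⟩ := (pvMem_grow g rows cols v cells x).mp hx
          exact hP z (h z hz) x hstep

theorem pvLen_lt_union (s t : List (Int × Int)) (hs : s.Nodup) (y : Int × Int)
    (hy : y ∈ t) (hyn : y ∉ s) : s.length + 1 ≤ (PySem.Set.union s t).length := by
  have hnd := PySem.Set.nodup_union s t hs
  have hsub : insert y s.toFinset ⊆ (PySem.Set.union s t).toFinset := by
    intro z hz
    rw [List.mem_toFinset]
    rcases Finset.mem_insert.mp hz with rfl | hz
    · exact (PySem.Set.mem_union s t z).mpr (Or.inr hy)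
    · exact (PySem.Set.mem_union s t z).mpr (Or.inl (List.mem_toFinset.mp hz))
  have h1 := Finset.card_le_card hsub
  rw [Finset.card_insert_of_notMem (by simpa using hyn), List.toFinset_card_of_nodup hs,
    List.toFinset_card_of_nodup hnd] at h1
  exact h1

theorem pvSat_growth (g : List (List Int)) (rows cols v : Int) (n : Nat)
    (cells : List (Int × Int)) (hnd : cells.Nodup)
    (hnc : ¬ ∀ y ∈ pvGrow g rows cols v (pvSat g rows cols v n cells),
        y ∈ pvSat g rows cols v n cells) :
    cells.length + n ≤ (pvSat g rows cols v n cells).length := by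
  induction n generalizing cells with
  | zero => rw [pvSat]; omega
  | succ n ih =>
      rw [pvSat] at hnc ⊢
      by_cases hsub : PySem.Set.issubset (pvGrow g rows cols v cells) cells = true
      · rw [if_pos hsub] at hnc ⊢
        exact absurd (fun y hy => (PySem.Set.issubset_iff _ _).mp hsub y hy) hnc
      · rw [if_neg hsub] at hnc ⊢
        have hex : ∃ y ∈ pvGrow g rows cols v cells, y ∉ cells := by
          by_contra hno
          push_neg at hno
          exact hsub ((PySem.Set.issubset_iff _ _).mpr hno)
        obtain ⟨y, hy, hyn⟩ := hex
        have hgrow := pvLen_lt_union cells (pvGrow g rows cols v cells) hnd y hy hyn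
        have := ih (PySem.Set.union cells (pvGrow g rows cols v cells))
          (PySem.Set.nodup_union _ _ hnd) hnc
        omega

theorem pvSat_spec (g : List (List Int)) (rows cols v : Int) (s : Int × Int)
    (hs : pvInb rows cols s) (hvs : pvCell g s.1 s.2 = v) :
    (pvSat g rows cols v (rows * cols).toNat (PySem.Set.ofList [s])).Nodup ∧
    (∀ y, y ∈ pvSat g rows cols v (rows * cols).toNat (PySem.Set.ofList [s]) ↔
      pvReach g rows cols v s y) := by
  have hnd0 : (PySem.Set.ofList [s] : List (Int × Int)).Nodup := PySem.Set.nodup_ofList _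
  have hndS := pvSat_nodup g rows cols v (rows * cols).toNat _ hnd0
  have hsound := pvSat_sound g rows cols v
    (fun x => pvInb rows cols x ∧ pvCell g x.1 x.2 = v ∧ pvReach g rows cols v s x)
    (fun x hx y hstep => ⟨hstep.2.1, hstep.2.2, hx.2.2.tail hstep⟩)
    (rows * cols).toNat (PySem.Set.ofList [s])
    (by
      intro x hx
      rw [PySem.Set.mem_ofList] at hx
      simp only [List.mem_cons, List.not_mem_nil, or_false] at hx
      subst hx
      exact ⟨hs, hvs, Relation.ReflTransGen.refl⟩)
  have hbound := pvLength_le_area rows cols _ hndS (fun p hp => (hsound p hp).1)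
  have hclosed : ∀ y ∈ pvGrow g rows cols v
      (pvSat g rows cols v (rows * cols).toNat (PySem.Set.ofList [s])),
      y ∈ pvSat g rows cols v (rows * cols).toNat (PySem.Set.ofList [s]) := by
    by_contra hnc
    push_neg at hnc
    have hgrowth := pvSat_growth g rows cols v (rows * cols).toNat (PySem.Set.ofList [s]) hnd0
      (by
        intro hall
        obtain ⟨y, hy1, hy2⟩ := hnc
        exact hy2 (hall y hy1))
    have h1 : 1 ≤ (PySem.Set.ofList [s] : List (Int × Int)).length :=
      List.length_pos_of_mem ((PySem.Set.mem_ofList _ _).mpr List.mem_cons_self)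
    omega
  refine ⟨hndS, ?_⟩
  intro y
  constructor
  · exact fun h => (hsound y h).2.2
  · intro hreach
    induction hreach with
    | refl =>
        exact pvSat_subset g rows cols v _ _ s ((PySem.Set.mem_ofList _ _).mpr List.mem_cons_self)
    | @tail b c hxb hstep ih =>
        exact hclosed c ((pvMem_grow g rows cols v _ c).mpr ⟨b, ih, hstep⟩)

-- ---- BFS (A's component computation) ----

def pvVisT (vis : List (List Bool)) (p : Int × Int) : Prop := pvVis? vis p.1 p.2 = some true

theorem pvNbr_mem_tgts (cr cc : Int) (y : Int × Int) (h : pvNbr (cr, cc) y) :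
    y ∈ pvDirs.map (fun d => (cr + d.1, cc + d.2)) := by
  simp only [pvDirs, List.map_cons, List.map_nil, List.mem_cons, List.not_mem_nil, or_false]
  unfold pvNbr at h
  obtain ⟨y1, y2⟩ := y
  simp only [Prod.mk.injEq] at h ⊢
  omega

theorem pvScanFold_spec (g : List (List Int)) (rows cols v cr cc : Int)
    (ds : List (Int × Int)) (q : List (Int × Int)) (vis : List (List Bool))
    (hs : pvShape rows cols vis)
    (hnd : (ds.map (fun d => (cr + d.1, cc + d.2))).Nodup) :
    (ds.foldl (pvScan g rows cols v cr cc) (q, vis)).1 =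
      q ++ (ds.map (fun d => (cr + d.1, cc + d.2))).filter
        (fun y => decide (0 ≤ y.1 ∧ y.1 < rows ∧ 0 ≤ y.2 ∧ y.2 < cols ∧
          pvVis? vis y.1 y.2 = some false ∧ pvCell g y.1 y.2 = v)) ∧
    pvShape rows cols (ds.foldl (pvScan g rows cols v cr cc) (q, vis)).2 ∧
    (∀ p : Int × Int, pvInb rows cols p →
      pvVis? (ds.foldl (pvScan g rows cols v cr cc) (q, vis)).2 p.1 p.2 =
        (if p ∈ (ds.map (fun d => (cr + d.1, cc + d.2))).filter
            (fun y => decide (0 ≤ y.1 ∧ y.1 < rows ∧ 0 ≤ y.2 ∧ y.2 < cols ∧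
              pvVis? vis y.1 y.2 = some false ∧ pvCell g y.1 y.2 = v))
          then some true else pvVis? vis p.1 p.2)) := by
  induction ds generalizing q vis with
  | nil => exact ⟨by simp, hs, fun p hp => by simp⟩
  | cons d ds ih =>
      simp only [List.map_cons, List.nodup_cons] at hnd
      obtain ⟨hndt, hnd'⟩ := hnd
      simp only [List.map_cons, List.foldl_cons, List.filter_cons]
      by_cases hacc : 0 ≤ cr + d.1 ∧ cr + d.1 < rows ∧ 0 ≤ cc + d.2 ∧ cc + d.2 < cols ∧
          pvVis? vis (cr + d.1) (cc + d.2) = some false ∧ pvCell g (cr + d.1) (cc + d.2) = v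
      · have hstep : pvScan g rows cols v cr cc (q, vis) d =
            (q ++ [(cr + d.1, cc + d.2)], pvSet2 vis (cr + d.1) (cc + d.2) true) := by
          unfold pvScan
          dsimp only
          rw [if_pos hacc]
        have hinbt : pvInb rows cols (cr + d.1, cc + d.2) :=
          ⟨hacc.1, hacc.2.1, hacc.2.2.1, hacc.2.2.2.1⟩
        have hs1 : pvShape rows cols (pvSet2 vis (cr + d.1) (cc + d.2) true) :=
          pvShape_set2 rows cols vis _ _ true hs
        rw [hstep]
        have hfc : ∀ y ∈ ds.map (fun d => (cr + d.1, cc + d.2)),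
            (decide (0 ≤ y.1 ∧ y.1 < rows ∧ 0 ≤ y.2 ∧ y.2 < cols ∧
              pvVis? (pvSet2 vis (cr + d.1) (cc + d.2) true) y.1 y.2 = some false ∧
              pvCell g y.1 y.2 = v)) =
            (decide (0 ≤ y.1 ∧ y.1 < rows ∧ 0 ≤ y.2 ∧ y.2 < cols ∧
              pvVis? vis y.1 y.2 = some false ∧ pvCell g y.1 y.2 = v)) := by
          intro y hy
          have hyne : y ≠ (cr + d.1, cc + d.2) := fun h => hndt (h ▸ hy)
          rw [decide_eq_decide]
          by_cases hyin : pvInb rows cols y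
          · rw [pvVis?_set2_ne rows cols vis (cr + d.1, cc + d.2) y true hinbt hyin
              (fun h => hyne h.symm)]
          · constructor <;> intro hh <;>
              exact absurd ⟨hh.1, hh.2.1, hh.2.2.1, hh.2.2.2.1⟩ hyin
        obtain ⟨ih1, ih2, ih3⟩ := ih (q ++ [(cr + d.1, cc + d.2)])
          (pvSet2 vis (cr + d.1) (cc + d.2) true) hs1 hnd'
        rw [List.filter_congr hfc] at ih1 ih3
        rw [if_pos (by rw [decide_eq_true_eq]; exact hacc)]
        refine ⟨by rw [ih1]; simp, ih2, ?_⟩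
        intro p hp
        rw [ih3 p hp]
        by_cases hpt : p = (cr + d.1, cc + d.2)
        · subst hpt
          have hnm : (cr + d.1, cc + d.2) ∉ (ds.map (fun d => (cr + d.1, cc + d.2))).filter
              (fun y => decide (0 ≤ y.1 ∧ y.1 < rows ∧ 0 ≤ y.2 ∧ y.2 < cols ∧
                pvVis? vis y.1 y.2 = some false ∧ pvCell g y.1 y.2 = v)) := by
            intro hmem
            exact hndt (List.mem_of_mem_filter hmem)
          rw [if_neg hnm, if_pos List.mem_cons_self]
          exact pvVis?_set2_self rows cols vis _ true hs hinbt
        · rw [pvVis?_set2_ne rows cols vis (cr + d.1, cc + d.2) p true hinbt hp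
            (fun h => hpt h.symm)]
          by_cases hpm : p ∈ (ds.map (fun d => (cr + d.1, cc + d.2))).filter
              (fun y => decide (0 ≤ y.1 ∧ y.1 < rows ∧ 0 ≤ y.2 ∧ y.2 < cols ∧
                pvVis? vis y.1 y.2 = some false ∧ pvCell g y.1 y.2 = v))
          · rw [if_pos hpm, if_pos (List.mem_cons_of_mem _ hpm)]
          · rw [if_neg hpm, if_neg (by
              intro hmem
              rcases List.mem_cons.mp hmem with he | he
              · exact hpt he
              · exact hpm he)]
      · have hstep : pvScan g rows cols v cr cc (q, vis) d = (q, vis) := by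
          unfold pvScan
          dsimp only
          rw [if_neg hacc]
        rw [hstep, if_neg (by rw [decide_eq_true_eq]; exact hacc)]
        obtain ⟨ih1, ih2, ih3⟩ := ih q vis hs hnd'
        exact ⟨ih1, ih2, ih3⟩

theorem pvBfs_spec (g : List (List Int)) (rows cols v : Int) (seed : Int × Int)
    (vis0 : Int × Int → Prop)
    (hv0dis : ∀ p, pvReach g rows cols v seed p → ¬ vis0 p) :
    ∀ (q : List (Int × Int)) (vis : List (List Bool)) (comp : List (Int × Int)),
    pvShape rows cols vis → q.Nodup → comp.Nodup → (∀ p ∈ comp, p ∉ q) →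
    (∀ p, p ∈ comp ∨ p ∈ q →
      pvInb rows cols p ∧ pvCell g p.1 p.2 = v ∧ pvReach g rows cols v seed p) →
    (∀ p ∈ comp, ∀ y, pvStepR g rows cols v p y → pvVisT vis y) →
    (∀ p, pvInb rows cols p → (pvVisT vis p ↔ vis0 p ∨ p ∈ comp ∨ p ∈ q)) →
    (seed ∈ comp ∨ seed ∈ q) →
    (pvBfs g rows cols v q vis comp).1.Nodup ∧
    (∀ p, p ∈ (pvBfs g rows cols v q vis comp).1 ↔ pvReach g rows cols v seed p) ∧
    pvShape rows cols (pvBfs g rows cols v q vis comp).2 ∧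
    (∀ p, pvInb rows cols p →
      (pvVisT (pvBfs g rows cols v q vis comp).2 p ↔ vis0 p ∨ pvReach g rows cols v seed p)) := by
  intro q vis comp
  induction q, vis, comp using pvBfs.induct g rows cols v with
  | case1 vis comp =>
      intro hs hqn hcn hdisj hmem hclosed hvis hseed
      rw [pvBfs]
      dsimp only
      have hcompiff : ∀ p, p ∈ comp ↔ pvReach g rows cols v seed p := by
        intro p
        constructor
        · exact fun h => (hmem p (Or.inl h)).2.2
        · intro hre
          induction hre with
          | refl => exact hseed.resolve_right (by simp)
          | @tail b c hxb hstep ih2 =>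
              have hvtc := hclosed b ih2 c hstep
              rcases (hvis c hstep.2.1).mp hvtc with h0 | hc | hc
              · exact absurd h0 (hv0dis c (hxb.tail hstep))
              · exact hc
              · simp at hc
      refine ⟨hcn, hcompiff, hs, ?_⟩
      intro p hp
      have h := hvis p hp
      unfold pvVisT at h ⊢
      rw [h]
      simp only [List.not_mem_nil, or_false]
      rw [hcompiff p]
  | case2 cr cc q vis comp st ih =>
      intro hs hqn hcn hdisj hmem hclosed hvis hseed
      rw [pvBfs]
      obtain ⟨hxinb, hxval, hxreach⟩ := hmem (cr, cc) (Or.inr List.mem_cons_self)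
      have hnd4 : ((pvDirs.map (fun d => (cr + d.1, cc + d.2)))).Nodup := by
        have hdnd : pvDirs.Nodup := by decide
        exact hdnd.map_on (fun x hx y hy hxy => by
          obtain ⟨x1, x2⟩ := x
          obtain ⟨y1, y2⟩ := y
          simp only [Prod.mk.injEq] at hxy ⊢
          omega)
      obtain ⟨hf1, hf2, hf3⟩ := pvScanFold_spec g rows cols v cr cc pvDirs q vis hs hnd4
      set NEW := (pvDirs.map (fun d => (cr + d.1, cc + d.2))).filter
          (fun y => decide (0 ≤ y.1 ∧ y.1 < rows ∧ 0 ≤ y.2 ∧ y.2 < cols ∧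
            pvVis? vis y.1 y.2 = some false ∧ pvCell g y.1 y.2 = v)) with hNEW
      have hnewstep : ∀ y ∈ NEW,
          pvStepR g rows cols v (cr, cc) y ∧ pvVis? vis y.1 y.2 = some false := by
        intro y hy
        rw [hNEW, List.mem_filter, decide_eq_true_eq] at hy
        obtain ⟨hyt, hyc⟩ := hy
        refine ⟨⟨?_, ⟨hyc.1, hyc.2.1, hyc.2.2.1, hyc.2.2.2.1⟩, hyc.2.2.2.2.2⟩, hyc.2.2.2.2.1⟩
        rw [List.mem_map] at hyt
        obtain ⟨d, hd, rfl⟩ := hyt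
        simp only [pvDirs, List.mem_cons, List.not_mem_nil, or_false] at hd
        unfold pvNbr
        obtain ⟨d1, d2⟩ := d
        simp only [Prod.mk.injEq] at hd ⊢
        omega
      have hnewnotvis : ∀ y ∈ NEW, ¬ pvVisT vis y := by
        intro y hy hvt
        unfold pvVisT at hvt
        rw [(hnewstep y hy).2] at hvt
        simp at hvt
      have hnewnodup : NEW.Nodup := by rw [hNEW]; exact hnd4.filter _
      have hqvisT : ∀ p, p ∈ (cr, cc) :: q → pvVisT vis p := fun p hp =>
        (hvis p (hmem p (Or.inr hp)).1).mpr (Or.inr (Or.inr hp))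
      have hcompvisT : ∀ p ∈ comp, pvVisT vis p := fun p hp =>
        (hvis p (hmem p (Or.inl hp)).1).mpr (Or.inr (Or.inl hp))
      have hxnotcomp : (cr, cc) ∉ comp := fun h => hdisj _ h List.mem_cons_self
      have hqn' : q.Nodup := (List.nodup_cons.mp hqn).2
      have hxq : (cr, cc) ∉ q := (List.nodup_cons.mp hqn).1
      have hvismono : ∀ y, pvInb rows cols y → pvVisT vis y →
          pvVisT (List.foldl (pvScan g rows cols v cr cc) (q, vis) pvDirs).2 y := by
        intro y hyi hyv
        unfold pvVisT
        rw [hf3 y hyi]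
        by_cases hyn : y ∈ NEW
        · rw [if_pos hyn]
        · rw [if_neg hyn]; exact hyv
      refine ih hf2 ?_ ?_ ?_ ?_ ?_ ?_ ?_
      · rw [hf1]
        exact List.Nodup.append hqn' hnewnodup
          (fun y hyq hyn => hnewnotvis y hyn (hqvisT y (List.mem_cons_of_mem _ hyq)))
      · refine List.Nodup.append hcn (List.nodup_singleton _) ?_
        intro a ha hb
        simp only [List.mem_cons, List.not_mem_nil, or_false] at hb
        subst hb
        exact hxnotcomp ha
      · intro p hp hpq
        rw [hf1] at hpq
        rcases List.mem_append.mp hp with hpc | hpx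
        · rcases List.mem_append.mp hpq with h2 | h2
          · exact hdisj p hpc (List.mem_cons_of_mem _ h2)
          · exact hnewnotvis p h2 (hcompvisT p hpc)
        · simp only [List.mem_cons, List.not_mem_nil, or_false] at hpx
          subst hpx
          rcases List.mem_append.mp hpq with h2 | h2
          · exact hxq h2
          · exact hnewnotvis _ h2 (hqvisT _ List.mem_cons_self)
      · intro p hp
        rcases hp with hp | hp
        · rcases List.mem_append.mp hp with hpc | hpx
          · exact hmem p (Or.inl hpc)
          · simp only [List.mem_cons, List.not_mem_nil, or_false] at hpx
            subst hpx
            exact ⟨hxinb, hxval, hxreach⟩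
        · rw [hf1] at hp
          rcases List.mem_append.mp hp with h2 | h2
          · exact hmem p (Or.inr (List.mem_cons_of_mem _ h2))
          · have hst := (hnewstep p h2).1
            exact ⟨hst.2.1, hst.2.2, hxreach.tail hst⟩
      · intro p hp y hstep
        rcases List.mem_append.mp hp with hpc | hpx
        · exact hvismono y hstep.2.1 (hclosed p hpc y hstep)
        · simp only [List.mem_cons, List.not_mem_nil, or_false] at hpx
          subst hpx
          by_cases hyv : pvVisT vis y
          · exact hvismono y hstep.2.1 hyv
          · have hyNEW : y ∈ NEW := by
              rw [hNEW, List.mem_filter, decide_eq_true_eq]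
              refine ⟨pvNbr_mem_tgts cr cc y hstep.1, hstep.2.1.1, hstep.2.1.2.1,
                hstep.2.1.2.2.1, hstep.2.1.2.2.2, ?_, hstep.2.2⟩
              obtain ⟨b, hb⟩ := pvVis?_isSome rows cols vis y hs hstep.2.1
              cases b with
              | false => exact hb
              | true => exact absurd hb hyv
            unfold pvVisT
            rw [hf3 y hstep.2.1, if_pos hyNEW]
      · intro p hp
        unfold pvVisT
        rw [hf3 p hp]
        by_cases hpn : p ∈ NEW
        · rw [if_pos hpn]
          constructor
          · intro _
            exact Or.inr (Or.inr (by rw [hf1]; exact List.mem_append.mpr (Or.inr hpn)))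
          · intro _; rfl
        · rw [if_neg hpn]
          have h := hvis p hp
          unfold pvVisT at h
          rw [h]
          constructor
          · rintro (h0 | hc | hq2)
            · exact Or.inl h0
            · exact Or.inr (Or.inl (List.mem_append.mpr (Or.inl hc)))
            · rcases List.mem_cons.mp hq2 with he | he
              · exact Or.inr (Or.inl (List.mem_append.mpr (Or.inr (by simp [he]))))
              · exact Or.inr (Or.inr (by rw [hf1]; exact List.mem_append.mpr (Or.inl he)))
          · rintro (h0 | hc | hq2)
            · exact Or.inl h0
            · rcases List.mem_append.mp hc with h2 | h2
              · exact Or.inr (Or.inl h2)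
              · simp only [List.mem_cons, List.not_mem_nil, or_false] at h2
                exact Or.inr (Or.inr (by simp [h2]))
            · rw [hf1] at hq2
              rcases List.mem_append.mp hq2 with h2 | h2
              · exact Or.inr (Or.inr (List.mem_cons_of_mem _ h2))
              · exact absurd h2 hpn
      · rcases hseed with hc | hq2
        · exact Or.inl (List.mem_append.mpr (Or.inl hc))
        · rcases List.mem_cons.mp hq2 with he | he
          · exact Or.inl (List.mem_append.mpr (Or.inr (by simp [he])))
          · exact Or.inr (by rw [hf1]; exact List.mem_append.mpr (Or.inl he))

-- ---- shared outer-loop machinery ----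

theorem pvNestedFold_inv {σ : Type} (rows cols : Int)
    (Inv : (Int × Int → Prop) → σ → Prop) (step : σ → Int → Int → σ)
    (hcongr : ∀ (P Q : Int × Int → Prop) st, (∀ p, P p ↔ Q p) → Inv P st → Inv Q st)
    (hstep : ∀ P st r c, 0 ≤ r → r < rows → 0 ≤ c → c < cols →
      Inv P st → Inv (fun p => P p ∨ p = (r, c)) (step st r c))
    (st0 : σ) (hst0 : Inv (fun _ => False) st0) :
    Inv (fun p => pvInb rows cols p)
      ((PySem.List.pyRange 0 rows 1).foldl (fun st r =>
        (PySem.List.pyRange 0 cols 1).foldl (fun st c => step st r c) st) st0) := by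
  have hinner : ∀ (cl : List Int) (P : Int × Int → Prop) (st : σ) (r : Int),
      0 ≤ r → r < rows → (∀ c ∈ cl, 0 ≤ c ∧ c < cols) → Inv P st →
      Inv (fun p => P p ∨ (p.1 = r ∧ p.2 ∈ cl)) (cl.foldl (fun st c => step st r c) st) := by
    intro cl
    induction cl with
    | nil =>
        intro P st r _ _ _ h
        exact hcongr _ _ _ (fun p => by simp) h
    | cons c cl ihc =>
        intro P st r hr0 hr1 hcl h
        simp only [List.foldl_cons]
        have h1 := hstep P st r c hr0 hr1 (hcl c List.mem_cons_self).1
          (hcl c List.mem_cons_self).2 h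
        have h2 := ihc _ _ r hr0 hr1 (fun c' hc' => hcl c' (List.mem_cons_of_mem _ hc')) h1
        refine hcongr _ _ _ ?_ h2
        intro p
        constructor
        · rintro ((hP | hpe) | ⟨he1, he2⟩)
          · exact Or.inl hP
          · exact Or.inr ⟨by rw [hpe], by rw [hpe]; exact List.mem_cons_self⟩
          · exact Or.inr ⟨he1, List.mem_cons_of_mem _ he2⟩
        · rintro (hP | ⟨he1, he2⟩)
          · exact Or.inl (Or.inl hP)
          · rcases List.mem_cons.mp he2 with he | he
            · refine Or.inl (Or.inr ?_)
              obtain ⟨a, b⟩ := p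
              simp only at he1 he
              rw [he1, he]
            · exact Or.inr ⟨he1, he⟩
  have houter : ∀ (rl : List Int) (P : Int × Int → Prop) (st : σ),
      (∀ r ∈ rl, 0 ≤ r ∧ r < rows) → Inv P st →
      Inv (fun p => P p ∨ (p.1 ∈ rl ∧ 0 ≤ p.2 ∧ p.2 < cols))
        (rl.foldl (fun st r =>
          (PySem.List.pyRange 0 cols 1).foldl (fun st c => step st r c) st) st) := by
    intro rl
    induction rl with
    | nil => intro P st _ h; exact hcongr _ _ _ (fun p => by simp) h
    | cons r rl ihr =>
        intro P st hrl h
        simp only [List.foldl_cons]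
        have h1 := hinner (PySem.List.pyRange 0 cols 1) P st r (hrl r List.mem_cons_self).1
          (hrl r List.mem_cons_self).2
          (fun c hc => PySem.List.mem_pyRange_one.mp hc) h
        have h2 := ihr _ _ (fun r' hr' => hrl r' (List.mem_cons_of_mem _ hr')) h1
        refine hcongr _ _ _ ?_ h2
        intro p
        constructor
        · rintro ((hP | ⟨he1, he2⟩) | ⟨he1, he2⟩)
          · exact Or.inl hP
          · exact Or.inr ⟨by rw [he1]; exact List.mem_cons_self,
              PySem.List.mem_pyRange_one.mp he2⟩
          · exact Or.inr ⟨List.mem_cons_of_mem _ he1, he2⟩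
        · rintro (hP | ⟨he1, he2⟩)
          · exact Or.inl (Or.inl hP)
          · rcases List.mem_cons.mp he1 with he | he
            · exact Or.inl (Or.inr ⟨he, PySem.List.mem_pyRange_one.mpr he2⟩)
            · exact Or.inr ⟨he, he2⟩
  have hmain := houter (PySem.List.pyRange 0 rows 1) (fun _ => False) st0
    (fun r hr => PySem.List.mem_pyRange_one.mp hr) hst0
  refine hcongr _ _ _ ?_ hmain
  intro p
  simp only [false_or]
  unfold pvInb
  constructor
  · rintro ⟨h1, h2, h3⟩
    have h4 := PySem.List.mem_pyRange_one.mp h1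
    exact ⟨h4.1, h4.2, h2, h3⟩
  · rintro ⟨a, b, c, d⟩
    exact ⟨PySem.List.mem_pyRange_one.mpr ⟨a, b⟩, c, d⟩

-- ---- A characterized ----

def pvRows (grid : List (List Int)) : Int := (grid.length : Int)
def pvCols (grid : List (List Int)) : Int :=
  if grid.length ≠ 0 then ((grid.headD []).length : Int) else 0

def pvSmall (grid : List (List Int)) (p : Int × Int) (m : Int) : Prop :=
  ∃ l : List (Int × Int), l.Nodup ∧
    (∀ y, y ∈ l ↔ pvReach grid (pvRows grid) (pvCols grid) (pvCell grid p.1 p.2) p y) ∧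
    (l.length : Int) ≤ m

def pvRecolP (grid : List (List Int)) (bg m : Int) (p : Int × Int) : Prop :=
  pvInb (pvRows grid) (pvCols grid) p ∧ pvCell grid p.1 p.2 ≠ bg ∧ pvSmall grid p m

def pvCondA (grid : List (List Int)) (ms : Int) (vis : List (List Bool)) (p : Int × Int) : Prop :=
  pvInb (pvRows grid) (pvCols grid) p ∧ pvVisT vis p ∧ pvSmall grid p ms

def pvVisChar (grid : List (List Int)) (bg : Int) (P : Int × Int → Prop)
    (vis : List (List Bool)) : Prop :=
  ∀ p, pvInb (pvRows grid) (pvCols grid) p →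
    (pvVisT vis p ↔ ∃ x, P x ∧ pvInb (pvRows grid) (pvCols grid) x ∧
      pvCell grid x.1 x.2 ≠ bg ∧
      pvReach grid (pvRows grid) (pvCols grid) (pvCell grid x.1 x.2) x p)

def pvInvA (grid : List (List Int)) (bg ms nc : Int) (P : Int × Int → Prop)
    (st : List (List Int) × List (List Bool)) : Prop :=
  pvShape (pvRows grid) (pvCols grid) st.2 ∧ pvSameShape st.1 grid ∧
  pvVisChar grid bg P st.2 ∧
  (∀ r' c' : Nat,
    (pvCondA grid ms st.2 ((r' : Int), (c' : Int)) →
      pvE? st.1 r' c' = (pvE? grid r' c').map (fun _ => nc)) ∧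
    (¬ pvCondA grid ms st.2 ((r' : Int), (c' : Int)) → pvE? st.1 r' c' = pvE? grid r' c'))

def pvStepA (grid : List (List Int)) (bg ms nc : Int)
    (st : List (List Int) × List (List Bool)) (r c : Int) :
    List (List Int) × List (List Bool) :=
  let v := pvCell grid r c
  if v = bg ∨ pvVis? st.2 r c = some true then st
  else
    let bf := pvBfs grid (pvRows grid) (pvCols grid) v [(r, c)] (pvSet2 st.2 r c true) []
    if (bf.1.length : Int) ≤ ms then
      (bf.1.foldl (fun res p => pvSet2 res p.1 p.2 nc) st.1, bf.2)
    else (st.1, bf.2)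

theorem pvRecolor_eq (grid : List (List Int)) (bg ms nc : Int) :
    recolor_small_components grid bg ms nc =
      ((PySem.List.pyRange 0 (pvRows grid) 1).foldl (fun st r =>
        (PySem.List.pyRange 0 (pvCols grid) 1).foldl
          (fun st c => pvStepA grid bg ms nc st r c) st)
        (grid.map (fun row => row),
          List.replicate grid.length (List.replicate (pvCols grid).toNat false))).1 := rfl

theorem pvInvA_congr (grid : List (List Int)) (bg ms nc : Int) (P Q : Int × Int → Prop)
    (st : List (List Int) × List (List Bool)) (h : ∀ p, P p ↔ Q p)
    (hi : pvInvA grid bg ms nc P st) : pvInvA grid bg ms nc Q st := by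
  obtain ⟨h1, h2, h3, h4⟩ := hi
  refine ⟨h1, h2, ?_, h4⟩
  intro p hp
  rw [h3 p hp]
  constructor
  · rintro ⟨x, hx, rest⟩; exact ⟨x, (h x).mp hx, rest⟩
  · rintro ⟨x, hx, rest⟩; exact ⟨x, (h x).mpr hx, rest⟩

theorem pvStepA_inv (grid : List (List Int)) (bg ms nc : Int) (P : Int × Int → Prop)
    (st : List (List Int) × List (List Bool)) (r c : Int)
    (hr0 : 0 ≤ r) (hr1 : r < pvRows grid) (hc0 : 0 ≤ c) (hc1 : c < pvCols grid)
    (hi : pvInvA grid bg ms nc P st) :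
    pvInvA grid bg ms nc (fun p => P p ∨ p = (r, c)) (pvStepA grid bg ms nc st r c) := by
  obtain ⟨hsh, hss, hvc, hres⟩ := hi
  have hxinb : pvInb (pvRows grid) (pvCols grid) (r, c) := ⟨hr0, hr1, hc0, hc1⟩
  unfold pvStepA
  dsimp only
  by_cases hskip : pvCell grid r c = bg ∨ pvVis? st.2 r c = some true
  · rw [if_pos hskip]
    refine ⟨hsh, hss, ?_, hres⟩
    intro p hp
    rw [hvc p hp]
    constructor
    · rintro ⟨y, hy, rest⟩
      exact ⟨y, Or.inl hy, rest⟩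
    · rintro ⟨y, hy | hye, hyinb, hybg, hyre⟩
      · exact ⟨y, hy, hyinb, hybg, hyre⟩
      · subst hye
        rcases hskip with hbg | hvis
        · exact absurd hbg hybg
        · obtain ⟨z, hz, hzi, hzb, hzr⟩ := (hvc (r, c) hxinb).mp hvis
          exact ⟨z, hz, hzi, hzb, (pvReach_congr grid (pvRows grid) (pvCols grid)
            (pvCell grid z.1 z.2) z (r, c) hzi rfl hzr p).mp hyre⟩
  · rw [if_neg hskip]
    push_neg at hskip
    obtain ⟨hbgne, hnv⟩ := hskip
    have hdis : ∀ p, pvReach grid (pvRows grid) (pvCols grid) (pvCell grid r c) (r, c) p →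
        ¬ pvVisT st.2 p := by
      intro p hre hvisp
      have hpinb := (pvReach_props grid _ _ _ (r, c) p hxinb rfl hre).1
      obtain ⟨z, hz, hzi, hzb, hzr⟩ := (hvc p hpinb).mp hvisp
      have hvp1 := (pvReach_props grid _ _ _ (r, c) p hxinb rfl hre).2
      have hvp2 := (pvReach_props grid _ _ _ z p hzi rfl hzr).2
      have hsymm := pvReach_symm grid _ _ _ (r, c) p hxinb rfl hre
      have h1 : pvReach grid (pvRows grid) (pvCols grid) (pvCell grid z.1 z.2) z (r, c) := by
        refine Relation.ReflTransGen.trans hzr ?_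
        rw [← hvp2, hvp1]
        exact hsymm
      exact hnv ((hvc (r, c) hxinb).mpr ⟨z, hz, hzi, hzb, h1⟩)
    have hbfs := pvBfs_spec grid (pvRows grid) (pvCols grid) (pvCell grid r c) (r, c)
      (fun p => pvVisT st.2 p) hdis [(r, c)] (pvSet2 st.2 r c true) []
      (pvShape_set2 _ _ _ _ _ _ hsh)
      (List.nodup_singleton _) List.nodup_nil (by simp)
      (by
        intro p hp
        simp only [List.not_mem_nil, List.mem_cons, or_false, false_or] at hp
        subst hp
        exact ⟨hxinb, rfl, Relation.ReflTransGen.refl⟩)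
      (by simp)
      (by
        intro p hp
        simp only [List.not_mem_nil, List.mem_cons, or_false, false_or]
        by_cases hpx : p = (r, c)
        · subst hpx
          constructor
          · intro _; exact Or.inr rfl
          · intro _
            exact pvVis?_set2_self (pvRows grid) (pvCols grid) st.2 (r, c) true hsh hxinb
        · have hne := pvVis?_set2_ne (pvRows grid) (pvCols grid) st.2 (r, c) p true hxinb hp
            (fun h => hpx h.symm)
          unfold pvVisT
          rw [hne]
          constructor
          · intro h; exact Or.inl h
          · rintro (h | h)
            · exact h
            · exact absurd h hpx)
      (Or.inr List.mem_cons_self)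
    set BF := pvBfs grid (pvRows grid) (pvCols grid) (pvCell grid r c) [(r, c)]
      (pvSet2 st.2 r c true) [] with hBF
    obtain ⟨hcnd, hcmem, hcshape, hcvis⟩ := hbfs
    have hvc' : pvVisChar grid bg (fun p => P p ∨ p = (r, c)) BF.2 := by
      intro p hp
      rw [hcvis p hp]
      constructor
      · rintro (hv | hre)
        · obtain ⟨z, hz, rest⟩ := (hvc p hp).mp hv
          exact ⟨z, Or.inl hz, rest⟩
        · exact ⟨(r, c), Or.inr rfl, hxinb, hbgne, hre⟩
      · rintro ⟨z, hz | hze, hzi, hzb, hzr⟩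
        · exact Or.inl ((hvc p hp).mpr ⟨z, hz, hzi, hzb, hzr⟩)
        · subst hze; exact Or.inr hzr
    have hsmalliff : ∀ p, pvReach grid (pvRows grid) (pvCols grid) (pvCell grid r c) (r, c) p →
        (pvSmall grid p ms ↔ ((BF.1.length : Int) ≤ ms)) := by
      intro p hre
      have hmemiff : ∀ y, y ∈ BF.1 ↔
          pvReach grid (pvRows grid) (pvCols grid) (pvCell grid p.1 p.2) p y := by
        intro y
        rw [hcmem y]
        exact (pvReach_congr grid _ _ (pvCell grid r c) (r, c) p hxinb rfl hre y).symm
      constructor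
      · rintro ⟨l, hl1, hl2, hl3⟩
        have hle := pvLength_eq_of_nodup l _ hl1 hcnd (fun y => (hl2 y).trans (hmemiff y).symm)
        omega
      · intro hle
        exact ⟨_, hcnd, hmemiff, hle⟩
    by_cases hsz : ((BF.1.length : Int) ≤ ms)
    · rw [if_pos hsz]
      refine ⟨hcshape, pvSameShape_foldl_set2 _ _ _ _ hss, hvc', ?_⟩
      intro r' c'
      have hinbcomp : ∀ p ∈ BF.1, 0 ≤ p.1 ∧ 0 ≤ p.2 := by
        intro p hp2
        have h3 := (pvReach_props grid _ _ _ (r, c) p hxinb rfl ((hcmem p).mp hp2)).1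
        exact ⟨h3.1, h3.2.2.1⟩
      constructor
      · intro hcond
        rw [pvE?_foldl_set2 BF.1 st.1 nc hinbcomp r' c']
        by_cases hmem2 : ((r' : Int), (c' : Int)) ∈ BF.1
        · rw [if_pos hmem2]
          rw [(hres r' c').2 (fun hcold => hdis _ ((hcmem _).mp hmem2) hcold.2.1)]
        · rw [if_neg hmem2]
          obtain ⟨hq1, hq2, hq3⟩ := hcond
          rcases (hcvis _ hq1).mp hq2 with hv | hre2
          · exact (hres r' c').1 ⟨hq1, hv, hq3⟩
          · exact absurd ((hcmem _).mpr hre2) hmem2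
      · intro hncond
        rw [pvE?_foldl_set2 BF.1 st.1 nc hinbcomp r' c']
        by_cases hmem2 : ((r' : Int), (c' : Int)) ∈ BF.1
        · exfalso
          apply hncond
          have hre2 := (hcmem _).mp hmem2
          have hqinb := (pvReach_props grid _ _ _ (r, c) _ hxinb rfl hre2).1
          exact ⟨hqinb, (hcvis _ hqinb).mpr (Or.inr hre2), (hsmalliff _ hre2).mpr hsz⟩
        · rw [if_neg hmem2]
          refine (hres r' c').2 ?_
          rintro ⟨hq1, hq2, hq3⟩
          exact hncond ⟨hq1, (hcvis _ hq1).mpr (Or.inl hq2), hq3⟩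
    · rw [if_neg hsz]
      refine ⟨hcshape, hss, hvc', ?_⟩
      intro r' c'
      constructor
      · rintro ⟨hq1, hq2, hq3⟩
        rcases (hcvis _ hq1).mp hq2 with hv | hre2
        · exact (hres r' c').1 ⟨hq1, hv, hq3⟩
        · exact absurd hq3 (fun hsm => hsz ((hsmalliff _ hre2).mp hsm))
      · intro hncond
        refine (hres r' c').2 ?_
        rintro ⟨hq1, hq2, hq3⟩
        exact hncond ⟨hq1, (hcvis _ hq1).mpr (Or.inl hq2), hq3⟩

theorem pvVisT_replicate (n m : Nat) (p : Int × Int) :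
    ¬ pvVisT (List.replicate n (List.replicate m false)) p := by
  unfold pvVisT pvVis?
  intro h
  rw [List.getElem?_replicate] at h
  by_cases hn : p.1.toNat < n
  · rw [if_pos hn] at h
    simp only [Option.bind_some] at h
    rw [List.getElem?_replicate] at h
    by_cases hm : p.2.toNat < m
    · rw [if_pos hm] at h; simp at h
    · rw [if_neg hm] at h; simp at h
  · rw [if_neg hn] at h; simp at h

theorem pvInvA_init (grid : List (List Int)) (bg ms nc : Int) :
    pvInvA grid bg ms nc (fun _ => False)
      (grid.map (fun row => row),
        List.replicate grid.length (List.replicate (pvCols grid).toNat false)) := by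
  have hmap : grid.map (fun row => row) = grid := List.map_id' grid
  refine ⟨⟨by simp [pvRows], fun row hrow => by rw [List.eq_of_mem_replicate hrow]; simp⟩,
    ?_, ?_, ?_⟩
  · show pvSameShape (grid.map (fun row => row)) grid
    rw [hmap]
    exact pvSameShape_refl grid
  · intro p hp
    constructor
    · intro hvt; exact absurd hvt (pvVisT_replicate _ _ p)
    · rintro ⟨z, hz, _⟩; exact hz.elim
  · intro r' c'
    constructor
    · rintro ⟨_, hvt, _⟩; exact absurd hvt (pvVisT_replicate _ _ _)
    · intro _
      show pvE? (grid.map (fun row => row)) r' c' = pvE? grid r' c'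
      rw [hmap]

theorem pvCondA_final (grid : List (List Int)) (bg ms : Int) (vis : List (List Bool))
    (hvc : pvVisChar grid bg (fun p => pvInb (pvRows grid) (pvCols grid) p) vis)
    (q : Int × Int) :
    pvCondA grid ms vis q ↔ pvRecolP grid bg ms q := by
  unfold pvCondA pvRecolP
  constructor
  · rintro ⟨h1, h2, h3⟩
    obtain ⟨z, hzP, hzi, hzb, hzr⟩ := (hvc q h1).mp h2
    have hv := (pvReach_props grid _ _ _ z q hzi rfl hzr).2
    exact ⟨h1, by rw [hv]; exact hzb, h3⟩
  · rintro ⟨h1, h2, h3⟩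
    exact ⟨h1, (hvc q h1).mpr ⟨q, h1, h1, h2, Relation.ReflTransGen.refl⟩, h3⟩

theorem pvA_char (grid : List (List Int)) (bg ms nc : Int) :
    pvSameShape (recolor_small_components grid bg ms nc) grid ∧
    (∀ r' c' : Nat,
      (pvRecolP grid bg ms ((r' : Int), (c' : Int)) →
        pvE? (recolor_small_components grid bg ms nc) r' c' =
          (pvE? grid r' c').map (fun _ => nc)) ∧
      (¬ pvRecolP grid bg ms ((r' : Int), (c' : Int)) →
        pvE? (recolor_small_components grid bg ms nc) r' c' = pvE? grid r' c')) := by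
  rw [pvRecolor_eq]
  have hfold := pvNestedFold_inv (pvRows grid) (pvCols grid) (pvInvA grid bg ms nc)
    (pvStepA grid bg ms nc)
    (fun P Q st h hi => pvInvA_congr grid bg ms nc P Q st h hi)
    (fun P st r c h1 h2 h3 h4 hi => pvStepA_inv grid bg ms nc P st r c h1 h2 h3 h4 hi)
    _ (pvInvA_init grid bg ms nc)
  obtain ⟨hsh, hss, hvc, hres⟩ := hfold
  refine ⟨hss, ?_⟩
  intro r' c'
  exact ⟨fun h => (hres r' c').1 ((pvCondA_final grid bg ms _ hvc _).mpr h),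
    fun h => (hres r' c').2 (fun hc => h ((pvCondA_final grid bg ms _ hvc _).mp hc))⟩

-- ---- B characterized ----

def pvSizeIs (grid : List (List Int)) (p : Int × Int) (n : Int) : Prop :=
  ∃ l : List (Int × Int), l.Nodup ∧
    (∀ y, y ∈ l ↔ pvReach grid (pvRows grid) (pvCols grid) (pvCell grid p.1 p.2) p y) ∧
    (l.length : Int) = n

def pvInvB (grid : List (List Int)) (bg : Int) (P : Int × Int → Prop)
    (sz : PySem.Dict (Int × Int) Int) : Prop :=
  (∀ p n, sz.get? p = some n →
    pvInb (pvRows grid) (pvCols grid) p ∧ pvCell grid p.1 p.2 ≠ bg ∧ pvSizeIs grid p n) ∧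
  (∀ p, sz.contains p = true ↔ ∃ x, P x ∧ pvInb (pvRows grid) (pvCols grid) x ∧
    pvCell grid x.1 x.2 ≠ bg ∧
    pvReach grid (pvRows grid) (pvCols grid) (pvCell grid x.1 x.2) x p)

def pvStepB (grid : List (List Int)) (bg : Int) (sz : PySem.Dict (Int × Int) Int)
    (r c : Int) : PySem.Dict (Int × Int) Int :=
  let v := pvCell grid r c
  if v = bg ∨ sz.contains (r, c) then sz
  else
    let cells := pvSat grid (pvRows grid) (pvCols grid) v
      ((pvRows grid) * (pvCols grid)).toNat (PySem.Set.ofList [(r, c)])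
    let n : Int := cells.length
    cells.foldl (fun sz p => sz.insert p n) sz

theorem pvGet?_foldl_insert_const (l : List (Int × Int)) (sz : PySem.Dict (Int × Int) Int)
    (n : Int) (p : Int × Int) :
    (l.foldl (fun sz q => sz.insert q n) sz).get? p =
      if p ∈ l then some n else sz.get? p := by
  induction l generalizing sz with
  | nil => simp
  | cons q l ih =>
      simp only [List.foldl_cons, ih, PySem.Dict.get?_insert, List.mem_cons]
      by_cases h1 : p ∈ l <;> by_cases h2 : p = q <;> simp [h1, h2]

theorem pvStepB_inv (grid : List (List Int)) (bg : Int) (P : Int × Int → Prop)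
    (sz : PySem.Dict (Int × Int) Int) (r c : Int)
    (hr0 : 0 ≤ r) (hr1 : r < pvRows grid) (hc0 : 0 ≤ c) (hc1 : c < pvCols grid)
    (hi : pvInvB grid bg P sz) :
    pvInvB grid bg (fun p => P p ∨ p = (r, c)) (pvStepB grid bg sz r c) := by
  obtain ⟨hval, hkey⟩ := hi
  have hxinb : pvInb (pvRows grid) (pvCols grid) (r, c) := ⟨hr0, hr1, hc0, hc1⟩
  unfold pvStepB
  dsimp only
  by_cases hskip : pvCell grid r c = bg ∨ sz.contains (r, c) = true
  · rw [if_pos hskip]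
    refine ⟨hval, ?_⟩
    intro p
    rw [hkey p]
    constructor
    · rintro ⟨z, hz, rest⟩; exact ⟨z, Or.inl hz, rest⟩
    · rintro ⟨z, hz | hze, hzi, hzb, hzr⟩
      · exact ⟨z, hz, hzi, hzb, hzr⟩
      · subst hze
        rcases hskip with hbg | hcon
        · exact absurd hbg hzb
        · obtain ⟨w, hw, hwi, hwb, hwr⟩ := (hkey (r, c)).mp hcon
          exact ⟨w, hw, hwi, hwb,
            (pvReach_congr grid _ _ (pvCell grid w.1 w.2) w (r, c) hwi rfl hwr p).mp hzr⟩
  · rw [if_neg hskip]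
    push_neg at hskip
    obtain ⟨hbgne, hncon⟩ := hskip
    obtain ⟨hnd, hmem⟩ := pvSat_spec grid (pvRows grid) (pvCols grid) (pvCell grid r c) (r, c)
      hxinb rfl
    constructor
    · intro p m hpm
      rw [pvGet?_foldl_insert_const] at hpm
      by_cases hp : p ∈ pvSat grid (pvRows grid) (pvCols grid) (pvCell grid r c)
          ((pvRows grid) * (pvCols grid)).toNat (PySem.Set.ofList [(r, c)])
      · rw [if_pos hp] at hpm
        have hre := (hmem p).mp hp
        have hprops := pvReach_props grid _ _ _ (r, c) p hxinb rfl hre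
        refine ⟨hprops.1, by rw [hprops.2]; exact hbgne, ?_⟩
        refine ⟨_, hnd, ?_, Option.some.inj hpm⟩
        intro y
        rw [hmem y]
        exact (pvReach_congr grid _ _ _ (r, c) p hxinb rfl hre y).symm
      · rw [if_neg hp] at hpm
        exact hval p m hpm
    · intro p
      rw [PySem.Dict.contains_eq_isSome_get?, pvGet?_foldl_insert_const]
      by_cases hp : p ∈ pvSat grid (pvRows grid) (pvCols grid) (pvCell grid r c)
          ((pvRows grid) * (pvCols grid)).toNat (PySem.Set.ofList [(r, c)])
      · rw [if_pos hp]
        simp only [Option.isSome_some]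
        constructor
        · intro _; exact ⟨(r, c), Or.inr rfl, hxinb, hbgne, (hmem p).mp hp⟩
        · intro _; trivial
      · rw [if_neg hp, ← PySem.Dict.contains_eq_isSome_get?, hkey p]
        constructor
        · rintro ⟨z, hz, rest⟩; exact ⟨z, Or.inl hz, rest⟩
        · rintro ⟨z, hz | hze, hzi, hzb, hzr⟩
          · exact ⟨z, hz, hzi, hzb, hzr⟩
          · subst hze; exact absurd ((hmem p).mpr hzr) hp

def pvCondB (grid : List (List Int)) (bg ms : Int) (sz : PySem.Dict (Int × Int) Int)
    (p : Int × Int) : Prop :=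
  pvCell grid p.1 p.2 ≠ bg ∧ PySem.Dict.getD sz p 0 ≤ ms

def pvStepB2 (grid : List (List Int)) (bg ms nc : Int) (sz : PySem.Dict (Int × Int) Int)
    (res : List (List Int)) (r c : Int) : List (List Int) :=
  if pvCell grid r c ≠ bg ∧ PySem.Dict.getD sz (r, c) 0 ≤ ms then pvSet2 res r c nc
  else res

def pvInvB2 (grid : List (List Int)) (bg ms nc : Int) (sz : PySem.Dict (Int × Int) Int)
    (P : Int × Int → Prop) (res : List (List Int)) : Prop :=
  pvSameShape res grid ∧
  (∀ r' c' : Nat,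
    ((P ((r' : Int), (c' : Int)) ∧ pvCondB grid bg ms sz ((r' : Int), (c' : Int))) →
      pvE? res r' c' = (pvE? grid r' c').map (fun _ => nc)) ∧
    (¬ (P ((r' : Int), (c' : Int)) ∧ pvCondB grid bg ms sz ((r' : Int), (c' : Int))) →
      pvE? res r' c' = pvE? grid r' c'))

theorem pvStepB2_inv (grid : List (List Int)) (bg ms nc : Int)
    (sz : PySem.Dict (Int × Int) Int) (P : Int × Int → Prop) (res : List (List Int)) (r c : Int)
    (hr0 : 0 ≤ r) (hr1 : r < pvRows grid) (hc0 : 0 ≤ c) (hc1 : c < pvCols grid)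
    (hi : pvInvB2 grid bg ms nc sz P res) :
    pvInvB2 grid bg ms nc sz (fun p => P p ∨ p = (r, c)) (pvStepB2 grid bg ms nc sz res r c) := by
  obtain ⟨hss, hent⟩ := hi
  unfold pvStepB2
  by_cases hcond : pvCell grid r c ≠ bg ∧ PySem.Dict.getD sz (r, c) 0 ≤ ms
  · rw [if_pos hcond]
    refine ⟨pvSameShape_set2 _ _ _ _ _ hss, ?_⟩
    intro r' c'
    rw [pvE?_set2]
    by_cases hmatch : r' = r.toNat ∧ c' = c.toNat
    · rw [if_pos hmatch]
      have hq : ((r' : Int), (c' : Int)) = (r, c) := by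
        obtain ⟨e1, e2⟩ := hmatch
        simp only [Prod.mk.injEq]
        omega
      constructor
      · intro _
        by_cases hold : (P ((r' : Int), (c' : Int)) ∧
            pvCondB grid bg ms sz ((r' : Int), (c' : Int)))
        · rw [(hent r' c').1 hold]
          cases pvE? grid r' c' <;> simp
        · rw [(hent r' c').2 hold]
      · intro hn
        exfalso
        apply hn
        refine ⟨Or.inr hq, ?_⟩
        rw [hq]
        exact hcond
    · rw [if_neg hmatch]
      have hqne : ((r' : Int), (c' : Int)) ≠ (r, c) := by
        intro he
        apply hmatch
        simp only [Prod.mk.injEq] at he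
        constructor <;> omega
      constructor
      · rintro ⟨hP | hq, hc2⟩
        · exact (hent r' c').1 ⟨hP, hc2⟩
        · exact absurd hq hqne
      · intro hn
        refine (hent r' c').2 ?_
        rintro ⟨hP, hc2⟩
        exact hn ⟨Or.inl hP, hc2⟩
  · rw [if_neg hcond]
    refine ⟨hss, ?_⟩
    intro r' c'
    constructor
    · rintro ⟨hP | hq, hc2⟩
      · exact (hent r' c').1 ⟨hP, hc2⟩
      · have he1 : (r' : Int) = r := congrArg Prod.fst hq
        have he2 : (c' : Int) = c := congrArg Prod.snd hq
        subst he1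
        subst he2
        exact absurd hc2 hcond
    · intro hn
      refine (hent r' c').2 ?_
      rintro ⟨hP, hc2⟩
      exact hn ⟨Or.inl hP, hc2⟩

theorem pvRecolorAlt_eq (grid : List (List Int)) (bg ms nc : Int) :
    recolor_small_components_alt grid bg ms nc =
      (PySem.List.pyRange 0 (pvRows grid) 1).foldl (fun res r =>
        (PySem.List.pyRange 0 (pvCols grid) 1).foldl (fun res c =>
          pvStepB2 grid bg ms nc
            ((PySem.List.pyRange 0 (pvRows grid) 1).foldl (fun sz r =>
              (PySem.List.pyRange 0 (pvCols grid) 1).foldl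
                (fun sz c => pvStepB grid bg sz r c) sz)
              PySem.Dict.empty) res r c) res)
        (grid.map (fun row => row)) := rfl

theorem pvInvB_congr (grid : List (List Int)) (bg : Int) (P Q : Int × Int → Prop)
    (sz : PySem.Dict (Int × Int) Int) (h : ∀ p, P p ↔ Q p)
    (hi : pvInvB grid bg P sz) : pvInvB grid bg Q sz := by
  obtain ⟨h1, h2⟩ := hi
  refine ⟨h1, ?_⟩
  intro p
  rw [h2 p]
  constructor
  · rintro ⟨z, hz, rest⟩; exact ⟨z, (h z).mp hz, rest⟩
  · rintro ⟨z, hz, rest⟩; exact ⟨z, (h z).mpr hz, rest⟩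

theorem pvInvB2_congr (grid : List (List Int)) (bg ms nc : Int)
    (sz : PySem.Dict (Int × Int) Int) (P Q : Int × Int → Prop) (res : List (List Int))
    (h : ∀ p, P p ↔ Q p) (hi : pvInvB2 grid bg ms nc sz P res) :
    pvInvB2 grid bg ms nc sz Q res := by
  obtain ⟨h1, h2⟩ := hi
  refine ⟨h1, ?_⟩
  intro r' c'
  exact ⟨fun hc => (h2 r' c').1 ⟨(h _).mpr hc.1, hc.2⟩,
    fun hc => (h2 r' c').2 (fun hx => hc ⟨(h _).mp hx.1, hx.2⟩)⟩

theorem pvBfinal (grid : List (List Int)) (bg ms nc : Int) (sz : PySem.Dict (Int × Int) Int)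
    (hval : ∀ p n, sz.get? p = some n →
      pvInb (pvRows grid) (pvCols grid) p ∧ pvCell grid p.1 p.2 ≠ bg ∧ pvSizeIs grid p n)
    (hkeyf : ∀ p, sz.contains p = true ↔
      (pvInb (pvRows grid) (pvCols grid) p ∧ pvCell grid p.1 p.2 ≠ bg)) :
    pvSameShape ((PySem.List.pyRange 0 (pvRows grid) 1).foldl (fun res r =>
        (PySem.List.pyRange 0 (pvCols grid) 1).foldl
          (fun res c => pvStepB2 grid bg ms nc sz res r c) res)
        (grid.map (fun row => row))) grid ∧
    (∀ r' c' : Nat,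
      (pvRecolP grid bg ms ((r' : Int), (c' : Int)) →
        pvE? ((PySem.List.pyRange 0 (pvRows grid) 1).foldl (fun res r =>
          (PySem.List.pyRange 0 (pvCols grid) 1).foldl
            (fun res c => pvStepB2 grid bg ms nc sz res r c) res)
          (grid.map (fun row => row))) r' c' = (pvE? grid r' c').map (fun _ => nc)) ∧
      (¬ pvRecolP grid bg ms ((r' : Int), (c' : Int)) →
        pvE? ((PySem.List.pyRange 0 (pvRows grid) 1).foldl (fun res r =>
          (PySem.List.pyRange 0 (pvCols grid) 1).foldl
            (fun res c => pvStepB2 grid bg ms nc sz res r c) res)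
          (grid.map (fun row => row))) r' c' = pvE? grid r' c')) := by
  have hmap : grid.map (fun row => row) = grid := List.map_id' grid
  have hfold2 := pvNestedFold_inv (pvRows grid) (pvCols grid) (pvInvB2 grid bg ms nc sz)
    (pvStepB2 grid bg ms nc sz)
    (fun P Q st h hi => pvInvB2_congr grid bg ms nc sz P Q st h hi)
    (fun P st r c h1 h2 h3 h4 hi => pvStepB2_inv grid bg ms nc sz P st r c h1 h2 h3 h4 hi)
    (grid.map (fun row => row))
    ⟨by rw [hmap]; exact pvSameShape_refl grid,
     fun r' c' => ⟨fun h => h.1.elim, fun _ => by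
        show pvE? (grid.map (fun row => row)) r' c' = pvE? grid r' c'
        rw [hmap]⟩⟩
  obtain ⟨hss2, hent2⟩ := hfold2
  refine ⟨hss2, ?_⟩
  intro r' c'
  have hiff : (pvInb (pvRows grid) (pvCols grid) ((r' : Int), (c' : Int)) ∧
      pvCondB grid bg ms sz ((r' : Int), (c' : Int))) ↔
      pvRecolP grid bg ms ((r' : Int), (c' : Int)) := by
    unfold pvCondB pvRecolP
    constructor
    · rintro ⟨h1, h2, h3⟩
      have hcont := (hkeyf _).mpr ⟨h1, h2⟩
      rw [PySem.Dict.contains_eq_isSome_get?] at hcont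
      obtain ⟨n, hn⟩ := Option.isSome_iff_exists.mp hcont
      obtain ⟨_, _, l, hl1, hl2, hl3⟩ := hval _ _ hn
      refine ⟨h1, h2, l, hl1, hl2, ?_⟩
      rw [PySem.Dict.getD_eq_get?_getD, hn] at h3
      simp only [Option.getD_some] at h3
      omega
    · rintro ⟨h1, h2, l, hl1, hl2, hl3⟩
      refine ⟨h1, h2, ?_⟩
      have hcont := (hkeyf _).mpr ⟨h1, h2⟩
      rw [PySem.Dict.contains_eq_isSome_get?] at hcont
      obtain ⟨n, hn⟩ := Option.isSome_iff_exists.mp hcont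
      obtain ⟨_, _, l', hl1', hl2', hl3'⟩ := hval _ _ hn
      rw [PySem.Dict.getD_eq_get?_getD, hn]
      simp only [Option.getD_some]
      have hle := pvLength_eq_of_nodup l l' hl1 hl1' (fun y => (hl2 y).trans (hl2' y).symm)
      omega
  exact ⟨fun h => (hent2 r' c').1 (hiff.mpr h),
    fun h => (hent2 r' c').2 (fun hc => h (hiff.mp hc))⟩

theorem pvB_char (grid : List (List Int)) (bg ms nc : Int) :
    pvSameShape (recolor_small_components_alt grid bg ms nc) grid ∧
    (∀ r' c' : Nat,
      (pvRecolP grid bg ms ((r' : Int), (c' : Int)) →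
        pvE? (recolor_small_components_alt grid bg ms nc) r' c' =
          (pvE? grid r' c').map (fun _ => nc)) ∧
      (¬ pvRecolP grid bg ms ((r' : Int), (c' : Int)) →
        pvE? (recolor_small_components_alt grid bg ms nc) r' c' = pvE? grid r' c')) := by
  rw [pvRecolorAlt_eq]
  have hszfold := pvNestedFold_inv (pvRows grid) (pvCols grid) (pvInvB grid bg)
    (pvStepB grid bg)
    (fun P Q st h hi => pvInvB_congr grid bg P Q st h hi)
    (fun P st r c h1 h2 h3 h4 hi => pvStepB_inv grid bg P st r c h1 h2 h3 h4 hi)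
    PySem.Dict.empty
    (⟨fun p n h => absurd h (by rw [PySem.Dict.get?_empty]; simp),
      fun p => by rw [PySem.Dict.contains_empty]; simp⟩)
  obtain ⟨hval, hkey⟩ := hszfold
  have hkeyf : ∀ p, ((PySem.List.pyRange 0 (pvRows grid) 1).foldl (fun sz r =>
      (PySem.List.pyRange 0 (pvCols grid) 1).foldl (fun sz c => pvStepB grid bg sz r c) sz)
      PySem.Dict.empty).contains p = true ↔
      (pvInb (pvRows grid) (pvCols grid) p ∧ pvCell grid p.1 p.2 ≠ bg) := by
    intro p
    rw [hkey p]
    constructor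
    · rintro ⟨z, hzP, hzi, hzb, hzr⟩
      have hp := pvReach_props grid _ _ _ z p hzi rfl hzr
      exact ⟨hp.1, by rw [hp.2]; exact hzb⟩
    · rintro ⟨h1, h2⟩
      exact ⟨p, h1, h1, h2, Relation.ReflTransGen.refl⟩
  exact pvBfinal grid bg ms nc _ hval hkeyf

theorem pvAB_eq (grid : List (List Int)) (bg ms nc : Int) :
    recolor_small_components grid bg ms nc = recolor_small_components_alt grid bg ms nc := by
  obtain ⟨hsA, hA⟩ := pvA_char grid bg ms nc
  obtain ⟨hsB, hB⟩ := pvB_char grid bg ms nc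
  refine pvEq_of_entries _ _ grid hsA hsB ?_
  intro r c
  by_cases h : pvRecolP grid bg ms ((r : Int), (c : Int))
  · rw [(hA r c).1 h, (hB r c).1 h]
  · rw [(hA r c).2 h, (hB r c).2 h]

-- ===== VERDICT (by name: the statement is the Claim_ definition above) =====
theorem recolor_small_components_spec : Claim_equal_recolor_small_components := by
  intro grid background max_size new_color _ _
  unfold Spec_recolor_small_components
  exact pvAB_eq grid background max_size new_color
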